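-- pv_equiv track=rewrite | github.com/Kolonin-Gleb/ICT_EGE | 37_intProgramming_2/tasks.py | product_of_even_digits
-- ===== SOURCE A (Python) =====
-- def product_of_even_digits(num):
--     product = 1
--     while num > 0:
--         digit = num % 10
--         if digit % 2 == 0:
--             product *= digit
--         num //= 10
--     return product
-- ===== SOURCE B (Python) =====
-- import math
--
-- def product_of_even_digits(num):
--     def digits(n):
--         if n <= 0:
--             return []
--         return digits(n // 10) + [n % 10]
--     return math.prod(d for d in digits(num) if d % 2 == 0)
-- ===== Notes on version B (the rewrite author's own statement) =====
-- stated objective: alternative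
-- what changed: Replaces the single accumulating while-loop with a build/filter/reduce pipeline: a recursive helper builds the decimal digit list most-significant-first, then math.prod of the even digits (1 on empty, matching A's seed; negatives and zero yield the empty list, hence 1, like A).
import Mathlib
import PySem

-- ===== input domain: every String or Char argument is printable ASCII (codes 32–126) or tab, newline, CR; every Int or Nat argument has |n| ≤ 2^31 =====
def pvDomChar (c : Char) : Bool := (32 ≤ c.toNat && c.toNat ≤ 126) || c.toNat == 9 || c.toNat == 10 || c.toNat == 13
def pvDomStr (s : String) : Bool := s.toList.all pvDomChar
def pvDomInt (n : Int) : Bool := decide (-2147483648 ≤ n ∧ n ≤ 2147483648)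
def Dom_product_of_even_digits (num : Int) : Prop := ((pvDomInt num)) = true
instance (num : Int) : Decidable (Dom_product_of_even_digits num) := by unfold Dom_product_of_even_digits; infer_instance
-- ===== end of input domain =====

-- B replaces A's accumulating while-loop by a build/filter/reduce pipeline over the explicit digit list (alternative decomposition, same cost).


-- ===== PORT A =====
-- while num > 0: digit = num % 10; if digit % 2 == 0: product *= digit; num //= 10
def pvLoopA (num product : Int) : Int :=
  if h : num > 0 then
    let digit := PySem.Int.mod num 10
    pvLoopA (PySem.Int.floordiv num 10)
      (if PySem.Int.mod digit 2 == 0 then product * digit else product)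
  else product
termination_by num.toNat
decreasing_by
  rw [PySem.Int.floordiv_eq_ediv_of_pos (by omega)]
  omega

def product_of_even_digits (num : Int) : Int := pvLoopA num 1

-- ===== PORT B =====
-- digits(n): [] if n <= 0 else digits(n // 10) + [n % 10]
def pvDigitsB (n : Int) : List Int :=
  if h : n ≤ 0 then []
  else pvDigitsB (PySem.Int.floordiv n 10) ++ [PySem.Int.mod n 10]
termination_by n.toNat
decreasing_by
  rw [PySem.Int.floordiv_eq_ediv_of_pos (by omega)]
  omega

-- math.prod over the even digits
def product_of_even_digits_alt (num : Int) : Int :=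
  ((pvDigitsB num).filter (fun d => PySem.Int.mod d 2 == 0)).prod

-- ===== PRECONDITION & SPEC =====
def Spec_product_of_even_digits (num : Int) (out : Int) : Prop := out = product_of_even_digits_alt num
instance (num : Int) (out : Int) : Decidable (Spec_product_of_even_digits num out) := by unfold Spec_product_of_even_digits; infer_instance

-- ===== CLAIM (what is proved, stated in full; the proofs are below) =====
def Claim_equal_product_of_even_digits : Prop := ∀ (num : Int), Dom_product_of_even_digits num → Spec_product_of_even_digits num (product_of_even_digits num)

-- ===== LEMMAS AND PROOFS =====

-- A's loop computes the seed times the product of the even digits of B's digit list.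
theorem pvLoopA_eq (num product : Int) :
    pvLoopA num product
      = product * ((pvDigitsB num).filter (fun d => PySem.Int.mod d 2 == 0)).prod := by
  induction num, product using pvLoopA.induct with
  | case1 num product h digit ih =>
      rw [pvLoopA, pvDigitsB]
      simp only [dif_pos h, dif_neg (by omega : ¬ num ≤ 0)]
      simp only [digit, dite_eq_ite] at ih
      rw [ih, List.filter_append, List.prod_append]
      simp only [List.filter_cons, List.filter_nil]
      by_cases he : (PySem.Int.mod (PySem.Int.mod num 10) 2 == 0) = true
      · simp only [if_pos he, List.prod_cons, List.prod_nil]; ring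
      · simp only [if_neg he, List.prod_nil]; ring
  | case2 num product h =>
      rw [pvLoopA, pvDigitsB]
      simp only [dif_neg h, dif_pos (by omega : num ≤ 0)]
      simp

-- ===== VERDICT (by name: the statement is the Claim_ definition above) =====
theorem product_of_even_digits_spec : Claim_equal_product_of_even_digits := by
  intro num _
  unfold Spec_product_of_even_digits product_of_even_digits product_of_even_digits_alt
  rw [pvLoopA_eq]
  ring
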